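-- pv_equiv track=rewrite | github.com/IvayloArsov/softuni_python | python_fundamentals_2023/text_processing_exercises/10_winning_ticket.py | check_ticket
-- ===== SOURCE A (Python) =====
-- def check_ticket(ticket):
--
--     if len(ticket) != 20:
--         return "invalid ticket"
--
--     winning_symbols = ['@', '#', '$', '^']
--     side_a, side_b = ticket[:10], ticket[10:]
--     for match_symbol in winning_symbols:
--         for uninterrupted_match_length in range(10, 5, -1):
--             winning_symbols_repetition = match_symbol * uninterrupted_match_length
--             if winning_symbols_repetition in side_a and winning_symbols_repetition in side_b:
--                 if uninterrupted_match_length == 10: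
--                     return f'ticket "{ticket}" - {uninterrupted_match_length}{match_symbol} Jackpot!'
--                 return f'ticket "{ticket}" - {uninterrupted_match_length}{match_symbol}'
--     return f'ticket "{ticket}" - no match'
-- ===== SOURCE B (Python) =====
-- def check_ticket(ticket):
--     if len(ticket) != 20:
--         return "invalid ticket"
--
--     def longest_run(s, ch):
--         best = cur = 0
--         for c in s:
--             cur = cur + 1 if c == ch else 0
--             best = max(best, cur)
--         return best
--
--     side_a, side_b = ticket[:10], ticket[10:]
--     for sym in ['@', '#', '$', '^']:
--         m = min(longest_run(side_a, sym), longest_run(side_b, sym))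
--         if m >= 6:
--             tail = " Jackpot!" if m == 10 else ""
--             return f'ticket "{ticket}" - {m}{sym}{tail}'
--     return f'ticket "{ticket}" - no match'
-- ===== Notes on version B (the rewrite author's own statement) =====
-- stated objective: alternative
-- what changed: Replaces A's 40 generated-substring membership searches (4 symbols x 5 run lengths, each building sym*k and scanning both halves) by one linear run-length scan per symbol per half, then a min-and-threshold test per symbol in the same fixed order.
import Mathlib
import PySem

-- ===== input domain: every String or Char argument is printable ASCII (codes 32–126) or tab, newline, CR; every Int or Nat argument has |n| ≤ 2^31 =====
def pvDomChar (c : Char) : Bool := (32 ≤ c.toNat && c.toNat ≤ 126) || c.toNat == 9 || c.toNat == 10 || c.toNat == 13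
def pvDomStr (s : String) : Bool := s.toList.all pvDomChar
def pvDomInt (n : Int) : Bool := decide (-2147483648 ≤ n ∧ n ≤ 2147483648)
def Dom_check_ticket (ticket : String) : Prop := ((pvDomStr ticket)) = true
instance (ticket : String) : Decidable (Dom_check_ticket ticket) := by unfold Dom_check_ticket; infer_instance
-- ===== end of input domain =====

-- B replaces A's generated-substring searches (sym*k in each half, k = 10..6) by one
-- linear run-length scan per symbol per half and a min-and-threshold test (alternative).

-- ===== PORT A =====
-- inner loop: for uninterrupted_match_length in range(10, 5, -1): … return / fall through
def pvAInner (ticket : String) (side_a side_b : List Char) (sym : Char) :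
    List Int → Option String
  | [] => none
  | k :: ks =>
    let rep := PySem.List.pyRepeat [sym] k          -- match_symbol * uninterrupted_match_length
    if PySem.Chars.isIn rep side_a && PySem.Chars.isIn rep side_b then
      if k = 10 then
        some ("ticket \"" ++ ticket ++ "\" - " ++ PySem.Int.toStr k ++ String.ofList [sym] ++ " Jackpot!")
      else
        some ("ticket \"" ++ ticket ++ "\" - " ++ PySem.Int.toStr k ++ String.ofList [sym])
    else pvAInner ticket side_a side_b sym ks

-- outer loop: for match_symbol in winning_symbols
def pvAOuter (ticket : String) (side_a side_b : List Char) : List Char → String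
  | [] => "ticket \"" ++ ticket ++ "\" - no match"
  | sym :: rest =>
    match pvAInner ticket side_a side_b sym (PySem.List.pyRange 10 5 (-1)) with
    | some r => r
    | none => pvAOuter ticket side_a side_b rest

def check_ticket (ticket : String) : String :=
  if PySem.Str.len ticket ≠ 20 then "invalid ticket"
  else
    let side_a := PySem.Chars.slice ticket.toList none (some 10)
    let side_b := PySem.Chars.slice ticket.toList (some 10) none
    pvAOuter ticket side_a side_b ['@', '#', '$', '^']

-- ===== PORT B =====
-- longest_run(s, ch): best = cur = 0; for c in s: cur = cur+1 if c==ch else 0; best = max(best, cur)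
def pvLongestRun (s : List Char) (ch : Char) : Int :=
  (s.foldl (fun (p : Int × Int) c =>
      let cur := if c = ch then p.2 + 1 else 0
      (max p.1 cur, cur)) (0, 0)).1

-- for sym in ['@','#','$','^']: m = min(run a, run b); if m >= 6: return …
def pvBLoop (ticket : String) (side_a side_b : List Char) : List Char → String
  | [] => "ticket \"" ++ ticket ++ "\" - no match"
  | sym :: rest =>
    let m := min (pvLongestRun side_a sym) (pvLongestRun side_b sym)
    if 6 ≤ m then
      "ticket \"" ++ ticket ++ "\" - " ++ PySem.Int.toStr m ++ String.ofList [sym] ++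
        (if m = 10 then " Jackpot!" else "")
    else pvBLoop ticket side_a side_b rest

def check_ticket_alt (ticket : String) : String :=
  if PySem.Str.len ticket ≠ 20 then "invalid ticket"
  else
    let side_a := PySem.Chars.slice ticket.toList none (some 10)
    let side_b := PySem.Chars.slice ticket.toList (some 10) none
    pvBLoop ticket side_a side_b ['@', '#', '$', '^']

-- ===== PRECONDITION & SPEC =====
def Spec_check_ticket (ticket : String) (out : String) : Prop := out = check_ticket_alt ticket
instance (ticket : String) (out : String) : Decidable (Spec_check_ticket ticket out) := by unfold Spec_check_ticket; infer_instance

-- ===== CLAIM (what is proved, stated in full; the proofs are below) =====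
def Claim_equal_check_ticket : Prop := ∀ (ticket : String), Dom_check_ticket ticket → Spec_check_ticket ticket (check_ticket ticket)

-- ===== LEMMAS AND PROOFS =====

-- proof-only name for B's scan step (definitionally the foldl body of pvLongestRun)
def pvF (ch : Char) : (Int × Int) → Char → (Int × Int) :=
  fun p c =>
    let cur := if c = ch then p.2 + 1 else 0
    (max p.1 cur, cur)

theorem pvLongestRun_eq (s : List Char) (ch : Char) :
    pvLongestRun s ch = (s.foldl (pvF ch) (0, 0)).1 := rfl

-- a suffix ending in y: (u ++ [x]) <:+ (v ++ [y]) iff x = y and u <:+ v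
theorem pvConcatSuffixConcat {α : Type} (u v : List α) (x y : α) :
    (u ++ [x]) <:+ (v ++ [y]) ↔ x = y ∧ u <:+ v := by
  rw [← List.reverse_prefix]
  simp only [List.reverse_append, List.reverse_singleton, List.singleton_append,
    List.cons_prefix_cons, List.reverse_prefix]

-- an infix of v ++ [y] is an infix of v or a suffix of v ++ [y]
theorem pvInfixConcat {α : Type} (u v : List α) (y : α) :
    u <:+: (v ++ [y]) ↔ u <:+: v ∨ u <:+ (v ++ [y]) := by
  rw [← List.reverse_infix]
  simp only [List.reverse_append, List.reverse_singleton, List.singleton_append,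
    List.infix_cons_iff]
  constructor
  · rintro (h | h)
    · refine Or.inr ?_
      rw [← List.reverse_prefix]
      simpa using h
    · exact Or.inl (by rwa [List.reverse_infix] at h)
  · rintro (h | h)
    · exact Or.inr (by rwa [← List.reverse_infix] at h)
    · refine Or.inl ?_
      rw [← List.reverse_prefix] at h
      simpa using h

-- the run-scan state: cur tracks suffix runs, best tracks infix runs
theorem pvRun_spec (ch : Char) (s : List Char) :
    0 ≤ (s.foldl (pvF ch) (0, 0)).2 ∧
    (∀ k : Nat, ((k : Int) ≤ (s.foldl (pvF ch) (0, 0)).2 ↔ List.replicate k ch <:+ s)) ∧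
    (∀ k : Nat, ((k : Int) ≤ (s.foldl (pvF ch) (0, 0)).1 ↔ List.replicate k ch <:+: s)) := by
  induction s using List.reverseRecOn with
  | nil =>
    refine ⟨le_refl 0, fun k => ?_, fun k => ?_⟩ <;>
      simp [List.suffix_nil, List.infix_nil, List.replicate_eq_nil_iff]
  | append_singleton t a ih =>
    obtain ⟨ih0, ihcur, ihbest⟩ := ih
    rw [List.foldl_append, List.foldl_cons, List.foldl_nil]
    have hstep : pvF ch (t.foldl (pvF ch) (0, 0)) a =
        (max (t.foldl (pvF ch) (0, 0)).1 (if a = ch then (t.foldl (pvF ch) (0, 0)).2 + 1 else 0),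
         if a = ch then (t.foldl (pvF ch) (0, 0)).2 + 1 else 0) := rfl
    rw [hstep]
    have hsuf : ∀ k : Nat, ((k : Int) ≤ (if a = ch then (t.foldl (pvF ch) (0, 0)).2 + 1 else 0) ↔
        List.replicate k ch <:+ (t ++ [a])) := by
      intro k
      cases k with
      | zero =>
        refine iff_of_true ?_ (by simp)
        split <;> omega
      | succ j =>
        rw [List.replicate_succ', pvConcatSuffixConcat]
        by_cases hac : a = ch
        · subst hac
          rw [if_pos rfl]
          have hj := ihcur j
          push_cast
          constructor
          · intro hk; exact ⟨rfl, hj.mp (by omega)⟩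
          · rintro ⟨-, hs⟩; have := hj.mpr hs; omega
        · rw [if_neg hac]
          constructor
          · intro hk; exfalso; omega
          · rintro ⟨h, -⟩; exact absurd h.symm hac
    refine ⟨by split <;> omega, hsuf, fun k => ?_⟩
    rw [pvInfixConcat]
    have h1 := ihbest k
    have h2 := hsuf k
    simp only
    rw [← h1, ← h2]
    omega

theorem pvIsIn_run (s : List Char) (ch : Char) (k : Nat) :
    PySem.Chars.isIn (List.replicate k ch) s = decide ((k : Int) ≤ pvLongestRun s ch) := by
  rw [pvLongestRun_eq]
  have h : (PySem.Chars.isIn (List.replicate k ch) s = true) ↔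
      ((k : Int) ≤ (s.foldl (pvF ch) (0, 0)).1) := by
    rw [PySem.Chars.isIn_iff_infix]
    exact ((pvRun_spec ch s).2.2 k).symm
  by_cases hp : (k : Int) ≤ (s.foldl (pvF ch) (0, 0)).1
  · simp [hp, h.mpr hp]
  · simp only [hp, decide_false]
    rw [← Bool.not_eq_true]
    intro hc
    exact hp (h.mp hc)

theorem pvRun_nonneg (s : List Char) (ch : Char) : 0 ≤ pvLongestRun s ch := by
  rw [pvLongestRun_eq]
  exact ((pvRun_spec ch s).2.2 0).mpr (by simp)

theorem pvRun_le_len (s : List Char) (ch : Char) : pvLongestRun s ch ≤ s.length := by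
  have h0 := pvRun_nonneg s ch
  rw [pvLongestRun_eq] at h0 ⊢
  have h1 := ((pvRun_spec ch s).2.2 (s.foldl (pvF ch) (0, 0)).1.toNat).mp (by omega)
  have h2 := h1.length_le
  simp only [List.length_replicate] at h2
  omega

theorem pvInner_eq (ticket : String) (sa sb : List Char) (sym : Char)
    (ha : sa.length = 10) (hb : sb.length = 10) :
    pvAInner ticket sa sb sym (PySem.List.pyRange 10 5 (-1)) =
      (if 6 ≤ min (pvLongestRun sa sym) (pvLongestRun sb sym) then
        some ("ticket \"" ++ ticket ++ "\" - " ++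
          PySem.Int.toStr (min (pvLongestRun sa sym) (pvLongestRun sb sym)) ++ String.ofList [sym] ++
          (if min (pvLongestRun sa sym) (pvLongestRun sb sym) = 10 then " Jackpot!" else ""))
      else none) := by
  have hrange : PySem.List.pyRange 10 5 (-1) = [10, 9, 8, 7, 6] := by decide
  have hA0 := pvRun_nonneg sa sym
  have hB0 := pvRun_nonneg sb sym
  have hA1 := pvRun_le_len sa sym
  have hB1 := pvRun_le_len sb sym
  rw [ha] at hA1; rw [hb] at hB1
  set a := pvLongestRun sa sym with hadef
  set b := pvLongestRun sb sym with hbdef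
  have hcond : ∀ k : Nat, (PySem.Chars.isIn (PySem.List.pyRepeat [sym] (k : Int)) sa &&
      PySem.Chars.isIn (PySem.List.pyRepeat [sym] (k : Int)) sb) = decide ((k : Int) ≤ min a b) := by
    intro k
    rw [PySem.List.pyRepeat_singleton, Int.toNat_natCast, pvIsIn_run, pvIsIn_run,
      ← hadef, ← hbdef, ← Bool.decide_and, decide_eq_decide]
    exact le_min_iff.symm
  have h10 := hcond 10; have h9 := hcond 9; have h8 := hcond 8
  have h7 := hcond 7; have h6 := hcond 6
  push_cast at h10 h9 h8 h7 h6
  rw [hrange]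
  simp only [pvAInner, h10, h9, h8, h7, h6]
  have hcases : min a b = 10 ∨ min a b = 9 ∨ min a b = 8 ∨ min a b = 7 ∨ min a b = 6 ∨
      min a b < 6 := by omega
  have hs10 : ¬ (10 : Int) ≤ min a b → ¬ min a b = 10 := by omega
  rcases hcases with hm | hm | hm | hm | hm | hm
  · rw [hm]; norm_num
  · rw [hm]; norm_num [String.append_empty]
  · rw [hm]; norm_num [String.append_empty]
  · rw [hm]; norm_num [String.append_empty]
  · rw [hm]; norm_num [String.append_empty]
  · norm_num [show ¬ (10 : Int) ≤ min a b from by omega, show ¬ (9 : Int) ≤ min a b from by omega,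
      show ¬ (8 : Int) ≤ min a b from by omega, show ¬ (7 : Int) ≤ min a b from by omega,
      show ¬ (6 : Int) ≤ min a b from by omega]

theorem pvLoops_eq (ticket : String) (sa sb : List Char)
    (ha : sa.length = 10) (hb : sb.length = 10) (syms : List Char) :
    pvAOuter ticket sa sb syms = pvBLoop ticket sa sb syms := by
  induction syms with
  | nil => rfl
  | cons sym rest ih =>
    rw [pvAOuter, pvBLoop, pvInner_eq ticket sa sb sym ha hb]
    by_cases h6 : 6 ≤ min (pvLongestRun sa sym) (pvLongestRun sb sym) <;> simp [h6, ih]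

-- ===== VERDICT (by name: the statement is the Claim_ definition above) =====
theorem check_ticket_spec : Claim_equal_check_ticket := by
  intro ticket _
  unfold Spec_check_ticket check_ticket check_ticket_alt
  by_cases h : PySem.Str.len ticket ≠ 20
  · rw [if_pos h, if_pos h]
  · rw [if_neg h, if_neg h]
    have h20 : PySem.Str.len ticket = 20 := not_ne_iff.mp h
    rw [PySem.Str.len_eq] at h20
    have hl : ticket.toList.length = 20 := by exact_mod_cast h20
    have hsa : (PySem.Chars.slice ticket.toList none (some 10)).length = 10 := by
      rw [PySem.Chars.slice_eq_listSlice, show (10 : Int) = ((10 : Nat) : Int) from rfl,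
        PySem.List.slice_to_natCast]
      simp [hl]
    have hsb : (PySem.Chars.slice ticket.toList (some 10) none).length = 10 := by
      rw [PySem.Chars.slice_eq_listSlice, show (10 : Int) = ((10 : Nat) : Int) from rfl,
        PySem.List.slice_from_natCast]
      simp [hl]
    exact pvLoops_eq ticket _ _ hsa hsb _
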